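-- pv_equiv track=rewrite | github.com/HaoweiChan/EyeDiagramNet | tests/data_analyzer/sequence_visualizer.py | organize_layers
-- ===== SOURCE A (Python) =====
-- from typing import Dict, List, Tuple, Optional
--
-- def organize_layers(segments_info: List[Dict]) -> Dict[int, List[Dict]]:
--     """Organize segments by layer."""
--     layers = {}
--     for segment in segments_info:
--         layer_id = segment['layer']
--         if layer_id not in layers:
--             layers[layer_id] = []
--         layers[layer_id].append(segment)
--
--     # Sort segments within each layer by segment_id
--     for layer_id in layers:
--         layers[layer_id].sort(key=lambda x: x['segment_id'])
--
--     return layers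
-- ===== SOURCE B (Python) =====
-- def organize_layers(segments_info):
--     """Organize segments by layer."""
--     # one global stable sort by segment_id; slices of it are already ordered
--     ordered = sorted(segments_info, key=lambda x: x['segment_id'])
--     # layer ids in first-appearance order (same as A's dict insertion order)
--     keys = []
--     for segment in segments_info:
--         if segment['layer'] not in keys:
--             keys.append(segment['layer'])
--     # each layer's list = the matching slice of the globally sorted list
--     return {k: [seg for seg in ordered if seg['layer'] == k] for k in keys}
-- ===== Notes on version B (the rewrite author's own statement) =====
-- stated objective: alternative
-- what changed: B uses no grouping dict at all: it sorts the whole list once by segment_id, collects the distinct layer ids in first-appearance order, and builds each layer's list by filtering the globally sorted list, so no per-layer sort is needed.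
import Mathlib
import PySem

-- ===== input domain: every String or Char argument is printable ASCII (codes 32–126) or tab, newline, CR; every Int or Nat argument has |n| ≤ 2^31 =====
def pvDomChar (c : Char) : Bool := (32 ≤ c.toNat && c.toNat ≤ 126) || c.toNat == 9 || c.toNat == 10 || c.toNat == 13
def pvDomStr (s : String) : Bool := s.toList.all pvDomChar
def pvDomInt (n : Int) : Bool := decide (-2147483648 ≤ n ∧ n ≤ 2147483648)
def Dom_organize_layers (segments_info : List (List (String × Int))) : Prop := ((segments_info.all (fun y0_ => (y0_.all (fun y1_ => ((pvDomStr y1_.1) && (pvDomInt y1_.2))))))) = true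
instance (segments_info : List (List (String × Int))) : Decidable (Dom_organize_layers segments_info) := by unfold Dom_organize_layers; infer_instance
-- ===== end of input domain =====

-- B drops A's grouping dict entirely: one global stable sort by segment_id, the distinct layer ids
-- in first-appearance order, and each layer's list obtained by filtering the sorted list
-- (same asymptotic cost up to the number of layers; different decomposition).

-- segment['layer'] / segment['segment_id']: first-match lookup; Pre_ guarantees the key is present,
-- so the 0 default is never consulted on admitted inputs.
def pvLayer (seg : List (String × Int)) : Int := (PySem.Dict.mk seg).getD "layer" 0
def pvSegId (seg : List (String × Int)) : Int := (PySem.Dict.mk seg).getD "segment_id" 0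

-- ===== PORT A =====
def organize_layers (segments_info : List (List (String × Int))) : List (Int × List (List (String × Int))) :=
  -- for segment in segments_info: if layer not in layers: layers[layer]=[]; layers[layer].append(segment)
  let layers : PySem.Dict Int (List (List (String × Int))) :=
    segments_info.foldl (fun d seg => d.modify (pvLayer seg) [] (fun v => v ++ [seg])) PySem.Dict.empty
  -- for layer_id in layers: layers[layer_id].sort(key=lambda x: x['segment_id'])
  let layers2 :=
    layers.keys.foldl (fun d lid => d.modify lid [] (fun v => PySem.List.sorted v pvSegId)) layers
  layers2.items

-- ===== PORT B =====
def organize_layers_alt (segments_info : List (List (String × Int))) : List (Int × List (List (String × Int))) :=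
  -- ordered = sorted(segments_info, key=lambda x: x['segment_id'])
  let ordered := PySem.List.sorted segments_info pvSegId
  -- keys = []; for segment in segments_info: if segment['layer'] not in keys: keys.append(...)
  let keys : PySem.Set Int :=
    segments_info.foldl (fun ks seg => PySem.Set.add ks (pvLayer seg)) PySem.Set.empty
  -- {k: [seg for seg in ordered if seg['layer'] == k] for k in keys}
  keys.map (fun k => (k, ordered.filter (fun seg => pvLayer seg == k)))

-- ===== PRECONDITION & SPEC =====
-- Pre_ excludes exactly the inputs on which Python A raises KeyError: a segment missing 'layer' or 'segment_id'.
def Pre_organize_layers (segments_info : List (List (String × Int))) : Prop :=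
  (segments_info.all (fun seg => (PySem.Dict.mk seg).contains "layer" && (PySem.Dict.mk seg).contains "segment_id")) = true
instance (segments_info : List (List (String × Int))) : Decidable (Pre_organize_layers segments_info) := by unfold Pre_organize_layers; infer_instance
def pvWitness_organize_layers : (List (List (String × Int))) := [[("layer", 1), ("segment_id", 2)], [("layer", 0), ("segment_id", 1)]]

def Spec_organize_layers (segments_info : List (List (String × Int))) (out : List (Int × List (List (String × Int)))) : Prop := out = organize_layers_alt segments_info
instance (segments_info : List (List (String × Int))) (out : List (Int × List (List (String × Int)))) : Decidable (Spec_organize_layers segments_info out) := by unfold Spec_organize_layers; infer_instance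

-- ===== CLAIM (what is proved, stated in full; the proofs are below) =====
def Claim_equal_organize_layers : Prop := ∀ (segments_info : List (List (String × Int))), Dom_organize_layers segments_info → Pre_organize_layers segments_info → Spec_organize_layers segments_info (organize_layers segments_info)

-- ===== LEMMAS AND PROOFS =====

-- insertBy defining equations
theorem insertBy_nil {α : Type} (bef : α → α → Bool) (x : α) :
    PySem.List.insertBy bef x [] = [x] := rfl

theorem insertBy_cons {α : Type} (bef : α → α → Bool) (x y : α) (ys : List α) :
    PySem.List.insertBy bef x (y :: ys) =
      if bef x y then x :: y :: ys else y :: PySem.List.insertBy bef x ys := rfl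

-- insertBy into a key-sorted list keeps it key-sorted
theorem pairwise_insertBy {α : Type} (key : α → Int) (x : α) (ys : List α)
    (hs : ys.Pairwise (fun a b => key a ≤ key b)) :
    (PySem.List.insertBy (fun a b => decide (key a < key b)) x ys).Pairwise
      (fun a b => key a ≤ key b) := by
  induction ys with
  | nil => simp [insertBy_nil]
  | cons y ys ih =>
    rw [insertBy_cons]
    rcases List.pairwise_cons.mp hs with ⟨hy, hys⟩
    split_ifs with h
    · refine List.pairwise_cons.mpr ⟨?_, hs⟩
      intro z hz
      rcases List.mem_cons.mp hz with rfl | hz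
      · exact le_of_lt (by exact_mod_cast of_decide_eq_true h)
      · exact le_trans (le_of_lt (by exact_mod_cast of_decide_eq_true h)) (hy z hz)
    · refine List.pairwise_cons.mpr ⟨?_, ih hys⟩
      intro z hz
      rcases (PySem.List.mem_insertBy _ _ _ _).mp hz with rfl | hz
      · exact le_of_not_gt (fun hlt => h (decide_eq_true hlt))
      · exact hy z hz

-- filter commutes with insertBy into a key-sorted list
theorem filter_insertBy {α : Type} (key : α → Int) (p : α → Bool) (x : α) (ys : List α)
    (hs : ys.Pairwise (fun a b => key a ≤ key b)) :
    (PySem.List.insertBy (fun a b => decide (key a < key b)) x ys).filter p =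
      if p x then PySem.List.insertBy (fun a b => decide (key a < key b)) x (ys.filter p)
      else ys.filter p := by
  induction ys with
  | nil => by_cases hpx : p x = true <;> simp [insertBy_nil, hpx]
  | cons y ys ih =>
    rcases List.pairwise_cons.mp hs with ⟨hy, hys⟩
    rw [insertBy_cons]
    by_cases hlt : key x < key y
    · rw [if_pos (decide_eq_true hlt)]
      by_cases hpx : p x = true
      · rw [List.filter_cons_of_pos hpx, if_pos hpx]
        have hfront : ∀ z ∈ (y :: ys).filter p, key x < key z := by
          intro z hz
          rcases List.mem_cons.mp (List.mem_of_mem_filter hz) with rfl | hz'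
          · exact hlt
          · exact lt_of_lt_of_le hlt (hy z hz')
        cases hf : (y :: ys).filter p with
        | nil => rw [insertBy_nil]
        | cons z zs =>
          rw [insertBy_cons, if_pos (decide_eq_true (hfront z (hf ▸ List.mem_cons_self)))]
      · rw [List.filter_cons_of_neg hpx, if_neg hpx]
    · rw [if_neg (by simpa using hlt)]
      by_cases hpy : p y = true
      · rw [List.filter_cons_of_pos hpy, ih hys]
        by_cases hpx : p x = true
        · rw [if_pos hpx, if_pos hpx, List.filter_cons_of_pos hpy, insertBy_cons,
            if_neg (by simpa using hlt)]
        · rw [if_neg hpx, if_neg hpx, List.filter_cons_of_pos hpy]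
      · rw [List.filter_cons_of_neg hpy, ih hys, List.filter_cons_of_neg hpy]

-- filter commutes with the whole insertion-sort fold
theorem filter_foldl_insertBy {α : Type} (key : α → Int) (p : α → Bool) (l : List α) :
    ∀ acc : List α, acc.Pairwise (fun a b => key a ≤ key b) →
      (l.foldl (fun acc x => PySem.List.insertBy (fun a b => decide (key a < key b)) x acc) acc).filter p =
        (l.filter p).foldl (fun acc x => PySem.List.insertBy (fun a b => decide (key a < key b)) x acc) (acc.filter p) := by
  induction l with
  | nil => intro acc _; simp
  | cons a l ih =>
    intro acc hacc
    simp only [List.foldl_cons, List.filter_cons]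
    rw [ih _ (pairwise_insertBy key a acc hacc), filter_insertBy key p a acc hacc]
    by_cases hp : p a <;> simp [hp]

-- the crux: a stable sort commutes with filter
theorem filter_sorted {α : Type} (key : α → Int) (p : α → Bool) (l : List α) :
    (PySem.List.sorted l key).filter p = PySem.List.sorted (l.filter p) key := by
  rw [PySem.List.sorted_eq_foldl_insertBy, PySem.List.sorted_eq_foldl_insertBy]
  simpa using filter_foldl_insertBy key p l [] (List.Pairwise.nil)

-- the grouping fold: what each bucket holds
theorem groupGetD {α : Type} (key : α → Int) (l : List α) :
    ∀ (d : PySem.Dict Int (List α)) (c : Int),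
      (l.foldl (fun d x => d.modify (key x) [] (fun v => v ++ [x])) d).getD c [] =
        d.getD c [] ++ l.filter (fun x => key x == c) := by
  induction l with
  | nil => intro d c; simp
  | cons a l ih =>
    intro d c
    simp only [List.foldl_cons, List.filter_cons]
    rw [ih]
    rw [PySem.Dict.getD_modify]
    by_cases h : c = key a
    · simp [h]
    · have : (key a == c) = false := by simp [Ne.symm h]
      simp [h, this]

-- modifying every key of K once, at a key not in K / in K (K without duplicates)
theorem modEach_not_mem {ν : Type} (f : ν → ν) (d0 : ν) (K : List Int) (d : PySem.Dict Int ν) (c : Int)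
    (h : c ∉ K) :
    (K.foldl (fun d lid => d.modify lid d0 f) d).getD c d0 = d.getD c d0 := by
  induction K generalizing d with
  | nil => rfl
  | cons k K ih =>
    simp only [List.foldl_cons]
    rw [ih _ (fun hc => h (List.mem_cons_of_mem _ hc)), PySem.Dict.getD_modify,
      if_neg (by rintro rfl; exact h List.mem_cons_self)]

theorem modEach_mem {ν : Type} (f : ν → ν) (d0 : ν) (K : List Int) (d : PySem.Dict Int ν) (c : Int)
    (hnd : K.Nodup) (h : c ∈ K) :
    (K.foldl (fun d lid => d.modify lid d0 f) d).getD c d0 = f (d.getD c d0) := by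
  induction K generalizing d with
  | nil => cases h
  | cons k K ih =>
    simp only [List.foldl_cons]
    rcases List.mem_cons.mp h with rfl | hc
    · rw [modEach_not_mem _ _ _ _ _ (List.nodup_cons.mp hnd).1,
        PySem.Dict.getD_modify, if_pos rfl]
    · have hck : c ≠ k := fun e => (List.nodup_cons.mp hnd).1 (e ▸ hc)
      rw [ih _ (List.nodup_cons.mp hnd).2 hc, PySem.Dict.getD_modify, if_neg hck]

-- Set.update by elements already present is a no-op
theorem update_of_subset {α : Type} [BEq α] [LawfulBEq α] (s : PySem.Set α) (xs : List α)
    (h : ∀ x ∈ xs, x ∈ s) : PySem.Set.update s xs = s := by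
  rw [PySem.Set.update_eq_append_filter]
  have : (PySem.Set.ofList xs).filter (fun y => !s.contains y) = [] := by
    rw [List.filter_eq_nil_iff]
    intro y hy
    have hmem : y ∈ s := h y ((PySem.Set.mem_ofList xs y).mp hy)
    simp [PySem.Set.contains]
    exact hmem
  rw [this, List.append_nil]

-- B's key-collecting fold is set(map pvLayer si) in first-appearance order
theorem keysB_eq_ofList_map {α : Type} (key : α → Int) (l : List α) :
    l.foldl (fun ks x => PySem.Set.add ks (key x)) PySem.Set.empty =
      PySem.Set.ofList (l.map key) := by
  rw [PySem.Set.ofList_eq_foldl, List.foldl_map]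
  rfl

-- ===== VERDICT (by name: the statement is the Claim_ definition above) =====
theorem organize_layers_spec : Claim_equal_organize_layers := by
  intro si _ _
  unfold Spec_organize_layers organize_layers organize_layers_alt
  simp only []
  set K : List Int := PySem.Set.ofList (si.map pvLayer) with hK
  -- A side dict
  set layers : PySem.Dict Int (List (List (String × Int))) :=
    si.foldl (fun d seg => d.modify (pvLayer seg) [] (fun v => v ++ [seg])) PySem.Dict.empty with hlayers
  have hkeysA : layers.keys = K := by
    rw [hlayers, PySem.Dict.keys_foldl_modify_key si pvLayer [] (fun _ seg v => v ++ [seg])]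
    rw [PySem.Dict.keys_empty, PySem.Set.update_nil_left]
  have hndA : layers.keys.Nodup := by
    rw [hlayers]
    exact PySem.Dict.nodup_keys_foldl_modify_key si pvLayer [] _ _ PySem.Dict.nodup_keys_empty
  have hgetA : ∀ c, layers.getD c [] = si.filter (fun seg => pvLayer seg == c) := by
    intro c; rw [hlayers, groupGetD]; simp
  set layers2 : PySem.Dict Int (List (List (String × Int))) :=
    layers.keys.foldl (fun d lid => d.modify lid [] (fun v => PySem.List.sorted v pvSegId)) layers with hlayers2
  have hkeys2 : layers2.keys = K := by
    rw [hlayers2, PySem.Dict.keys_foldl_modify_key layers.keys (fun lid => lid) [] (fun _ _ v => PySem.List.sorted v pvSegId)]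
    have hid : List.map (fun lid : Int => lid) layers.keys = layers.keys := by
      simp
    rw [hid, hkeysA, update_of_subset _ _ (fun x hx => hx)]
  have hnd2 : layers2.keys.Nodup := hkeys2 ▸ (hkeysA ▸ hndA)
  -- B side: its keys fold is exactly K
  rw [keysB_eq_ofList_map pvLayer si, ← hK]
  -- items via keys
  rw [PySem.Dict.items_eq_map_keys layers2 hnd2 [], hkeys2]
  apply List.map_congr_left
  intro c hc
  have hA : layers2.getD c [] = PySem.List.sorted (si.filter (fun seg => pvLayer seg == c)) pvSegId := by
    rw [hlayers2, modEach_mem _ _ _ _ _ hndA (hkeysA ▸ hc), hgetA]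
  rw [hA, filter_sorted]
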